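-- pv_equiv track=rewrite | github.com/sejalgupta/mit6.0001 | ps3.py | update_hand
-- ===== SOURCE A (Python) =====
-- import copy
--
-- def update_hand(hand, word):
--     """
--     Does NOT assume that hand contains every letter in word at least as
--     many times as the letter appears in word. Letters in word that don't
--     appear in hand should be ignored. Letters that appear in word more times
--     than in hand should never result in a negative count; instead, set the
--     count in the returned hand to 0 (or remove the letter from the
--     dictionary, depending on how your code is structured).
--
--     Updates the hand: uses up the letters in the given word
--     and returns the new hand, without those letters in it.
--
--     Has no side effects: does not modify hand.
--
--     word: string
--     hand: dictionary (string -> int)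
--     returns: dictionary (string -> int)
--     """
--
--     word = word.lower()
--     currentHand = copy.deepcopy(hand)
--     for letter in word:
--         if currentHand.get(letter) is not None:
--             if word.find(letter) > -1:
--                 currentHand[letter] = currentHand.get(letter) - 1
--     return currentHand
-- ===== SOURCE B (Python) =====
-- def update_hand(hand, word):
--     counts = {}
--     for ch in word.lower():
--         counts[ch] = counts.get(ch, 0) + 1
--     return {letter: hand[letter] - counts.get(letter, 0) for letter in hand}
-- ===== Notes on version B (the rewrite author's own statement) =====
-- stated objective: idiomatic
-- what changed: B builds a frequency table of the lowercased word once and produces the result in a single pass over the hand, subtracting each key's count, instead of A's per-letter lookup-and-decrement loop with a redundant word.find check.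
import Mathlib
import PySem

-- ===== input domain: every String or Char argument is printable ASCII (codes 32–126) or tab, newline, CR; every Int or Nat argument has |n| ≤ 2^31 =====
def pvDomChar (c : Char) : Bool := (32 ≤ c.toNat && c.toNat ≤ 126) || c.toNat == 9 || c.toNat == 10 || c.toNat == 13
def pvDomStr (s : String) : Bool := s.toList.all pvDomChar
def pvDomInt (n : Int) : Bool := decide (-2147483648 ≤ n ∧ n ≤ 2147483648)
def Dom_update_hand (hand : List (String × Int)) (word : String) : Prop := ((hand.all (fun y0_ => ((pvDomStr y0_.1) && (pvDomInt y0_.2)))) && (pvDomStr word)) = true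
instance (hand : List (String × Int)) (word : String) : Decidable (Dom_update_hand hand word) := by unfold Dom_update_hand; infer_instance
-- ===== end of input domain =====

-- B builds a frequency table of the lowercased word once and subtracts counts in a single
-- pass over the hand, instead of A's per-letter decrement loop; return values only (neither mutates).

-- ===== PORT A =====
-- one loop step of A: 'if currentHand.get(letter) is not None: if word.find(letter) > -1: currentHand[letter] = currentHand.get(letter) - 1'
def stepA (lw : List Char) (d : PySem.Dict String Int) (letter : String) : PySem.Dict String Int :=
  match d.get? letter with
  | some v => if PySem.Chars.find lw letter.toList > -1 then d.insert letter (v - 1) else d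
  | none => d

def update_hand (hand : List (String × Int)) (word : String) : List (String × Int) :=
  let lw := PySem.Chars.lower word.toList            -- word = word.lower()
  -- 'for letter in word' iterates the 1-character strings of word
  (((lw.map (fun c => String.ofList [c])).foldl (stepA lw) (PySem.Dict.mk hand)).items)

-- ===== PORT B =====
def update_hand_alt (hand : List (String × Int)) (word : String) : List (String × Int) :=
  let ws := (PySem.Chars.lower word.toList).map (fun c => String.ofList [c])
  -- counts[ch] = counts.get(ch, 0) + 1
  let counts : PySem.Dict String Int :=
    ws.foldl (fun d ch => d.insert ch (d.getD ch 0 + 1)) PySem.Dict.empty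
  let h := PySem.Dict.mk hand
  -- {letter: hand[letter] - counts.get(letter, 0) for letter in hand}
  h.keys.map (fun k => (k, h.getD k 0 - counts.getD k 0))

-- ===== PRECONDITION & SPEC =====
-- Pre_ excludes association lists with duplicate keys: they do not represent a Python dict
-- (the harness's dict collapses duplicates), so the list-level ports disagree there by encoding only.
def Pre_update_hand (hand : List (String × Int)) (word : String) : Prop :=
  (hand.map Prod.fst).Nodup
instance (hand : List (String × Int)) (word : String) : Decidable (Pre_update_hand hand word) := by unfold Pre_update_hand; infer_instance

def pvWitness_update_hand : (List (String × Int)) × String := ([("a", 2), ("b", 1)], "aab")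

def Spec_update_hand (hand : List (String × Int)) (word : String) (out : List (String × Int)) : Prop := out = update_hand_alt hand word
instance (hand : List (String × Int)) (word : String) (out : List (String × Int)) : Decidable (Spec_update_hand hand word out) := by unfold Spec_update_hand; infer_instance

-- ===== CLAIM (what is proved, stated in full; the proofs are below) =====
def Claim_equal_update_hand : Prop := ∀ (hand : List (String × Int)) (word : String), Dom_update_hand hand word → Pre_update_hand hand word → Spec_update_hand hand word (update_hand hand word)

-- ===== LEMMAS AND PROOFS =====

-- a character of the word is found by word.find
lemma find_singleton_pos (lw : List Char) (c : Char) (h : c ∈ lw) :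
    PySem.Chars.find lw [c] > -1 := by
  have hinf : [c] <:+: lw := (List.singleton_infix_iff c lw).mpr h
  have hne : PySem.Chars.find lw [c] ≠ -1 := by
    intro he
    exact (PySem.Chars.find_eq_neg_one_iff lw [c]).mp he hinf
  have hz : PySem.Chars.findFrom lw [c] ((0 : Nat) : Int) none = PySem.Chars.find lw [c] := by
    simp
  have hspec := PySem.Chars.findFrom_natCast_spec lw [c] 0 (Nat.zero_le _) (by rw [hz]; exact hne)
  have := hspec.1
  omega

-- A's decrement loop, characterised: over keys it is guaranteed to find, it subtracts the count
lemma foldl_stepA (lw : List Char) (ls : List String) (d : PySem.Dict String Int)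
    (hnd : d.keys.Nodup) (hc : ∀ s ∈ ls, PySem.Chars.find lw s.toList > -1) :
    (ls.foldl (stepA lw) d).items = d.items.map (fun p => (p.1, p.2 - (ls.count p.1 : Int))) := by
  induction ls generalizing d with
  | nil => simp
  | cons k t ih =>
    simp only [List.foldl_cons]
    rcases hget : d.get? k with _ | v
    · have hnk : ∀ p ∈ d.items, p.1 ≠ k := by
        intro p hp he
        have : k ∈ d.keys := by
          have := PySem.Dict.mem_keys_of_mem_items d hp
          rwa [he] at this
        have := (PySem.Dict.get?_eq_none_iff_not_mem_keys d k).mp hget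
        exact this ‹k ∈ d.keys›
      have : stepA lw d k = d := by simp [stepA, hget]
      rw [this, ih d hnd (fun s hs => hc s (List.mem_cons_of_mem _ hs))]
      refine List.map_congr_left ?_
      intro p hp
      have : p.1 ≠ k := hnk p hp
      simp [Ne.symm this]
    · have hmem : (k, v) ∈ d.items := PySem.Dict.mem_items_of_get?_eq_some d hget
      have hcont : d.contains k = true := by
        rw [PySem.Dict.contains_eq_isSome_get?, hget]; rfl
      have hstep : stepA lw d k = d.insert k (v - 1) := by
        simp [stepA, hget, hc k (List.mem_cons_self ..)]
      rw [hstep, ih _ (PySem.Dict.nodup_keys_insert _ _ _ hnd)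
            (fun s hs => hc s (List.mem_cons_of_mem _ hs)),
          PySem.Dict.items_insert_of_contains _ _ hcont, List.map_map]
      refine List.map_congr_left ?_
      intro p hp
      by_cases hk : p.1 = k
      · have hpv : p = (k, v) := by
          have : d.get? p.1 = some p.2 := PySem.Dict.get?_of_mem_items d hp hnd
          rw [hk, hget] at this
          obtain ⟨p1, p2⟩ := p
          simp_all
        subst hpv
        simp [Function.comp]
        ring
      · simp [Function.comp, hk, Ne.symm hk]

theorem update_hand_spec : Claim_equal_update_hand := by
  intro hand word _ hpre
  unfold Spec_update_hand update_hand update_hand_alt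
  have hnd : (PySem.Dict.mk hand).keys.Nodup := hpre
  set lw := PySem.Chars.lower word.toList with hlw
  set ws := lw.map (fun c => String.ofList [c]) with hws
  have hc : ∀ s ∈ ws, PySem.Chars.find lw s.toList > -1 := by
    intro s hs
    rw [hws] at hs
    obtain ⟨c, hcm, rfl⟩ := List.mem_map.mp hs
    simpa using find_singleton_pos lw c hcm
  rw [foldl_stepA lw ws (PySem.Dict.mk hand) hnd hc]
  have hcount : ∀ k, ((ws.foldl (fun d ch => d.insert ch (d.getD ch 0 + 1)) PySem.Dict.empty).getD k 0) = (ws.count k : Int) := by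
    intro k
    rw [PySem.Dict.getD_foldl_insert_add_one]
    simp
  have hitems : (PySem.Dict.mk hand).items = (PySem.Dict.mk hand).keys.map (fun k => (k, (PySem.Dict.mk hand).getD k 0)) :=
    PySem.Dict.items_eq_map_keys _ hnd 0
  rw [hitems, List.map_map]
  refine List.map_congr_left ?_
  intro k hk
  simp [Function.comp, hcount k]
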